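-- pv_equiv track=rewrite | github.com/Summerimm/Algorithm | 프로그래머스/unrated/150367. 표현 가능한 이진트리/표현 가능한 이진트리.py | solution
-- ===== SOURCE A (Python) =====
-- import math
--
-- def check(start, end, binaryNum):
--     if start == end:
--         return binaryNum[start]
--     mid = (start + end) // 2
--     left = check(start, mid-1, binaryNum)
--     if not left or (left == '1' and binaryNum[mid] == '0'):
--         return False
--     right = check(mid+1, end, binaryNum)
--     if not right or (right == '1' and binaryNum[mid] == '0'):
--         return False
--     return binaryNum[mid]
--
-- def solution(numbers):
--     answer = []
--     for num in numbers:
--         b = bin(num).lstrip('0b')       # 주어진 숫자를 이진수로 변환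
--         l1 = len(b)     # 이진수로 변환했을 때 길이
--         l2 = 2**(int(math.log2(l1)) + 1) - 1 # 주어진 숫자를 이진수로 바뀌었을 때 포화이진트리가 되기 위한 길이
--         b = b.zfill(l2) # 포화이진트리 길이만큼 왼쪽에 0 채우기
--
--         if check(0, len(b)-1, b):
--             answer.append(1)
--         else:
--             answer.append(0)
--
--     return answer
-- ===== SOURCE B (Python) =====
-- import math
--
--
-- def _tz(j):
--     # number of trailing zero bits of j (j >= 1)
--     t = 0
--     while j % 2 == 0:
--         j //= 2
--         t += 1
--     return t
--
--
-- def _node_ok(b, i):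
--     # local validity of node at 0-based index i of the in-order perfect-tree array b
--     t = _tz(i + 1)
--     if t == 0:          # leaf level: nothing to check
--         return True
--     return b[i] != '0' or (b[i - 2 ** (t - 1)] != '1' and b[i + 2 ** (t - 1)] != '1')
--
--
-- def solution(numbers):
--     answer = []
--     for num in numbers:
--         b = bin(num).lstrip('0b')
--         l2 = 2 ** (int(math.log2(len(b))) + 1) - 1
--         b = b.zfill(l2)
--         answer.append(1 if all(_node_ok(b, i) for i in range(len(b))) else 0)
--     return answer
-- ===== Notes on version B (the rewrite author's own statement) =====
-- stated objective: alternative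
-- what changed: Replaces the top-down recursive tree check with a flat bottom-up scan of the padded string: each internal node is located by the trailing-zero count of its 1-based index and checked locally ('0' node must not have a '1' child), which is equivalent because any failure in A propagates to the root.
-- outside the precondition, e.g. on solution([0]): A raises ValueError, B raises ValueError
import Mathlib
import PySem

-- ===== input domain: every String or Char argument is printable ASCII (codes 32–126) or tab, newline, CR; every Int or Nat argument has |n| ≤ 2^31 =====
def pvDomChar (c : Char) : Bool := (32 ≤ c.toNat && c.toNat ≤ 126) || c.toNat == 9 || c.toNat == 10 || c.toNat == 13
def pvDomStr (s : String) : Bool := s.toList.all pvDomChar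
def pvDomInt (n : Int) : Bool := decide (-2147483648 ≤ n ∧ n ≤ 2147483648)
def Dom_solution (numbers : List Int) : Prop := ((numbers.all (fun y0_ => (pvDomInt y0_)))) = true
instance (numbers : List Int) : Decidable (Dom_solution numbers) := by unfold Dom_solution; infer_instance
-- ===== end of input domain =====

-- B replaces A's top-down recursive tree check by a flat per-index local check (trailing-zero
-- level arithmetic over the in-order perfect-tree array); same conversion/padding, same results.


-- ===== PORT A =====
-- shared conversion helpers (identical lines in Source A and Source B): bin(num), .lstrip('0b'), .zfill(w)
-- binary digits of n, MSB first (bin's digit part); binNat 0 = [] (bin(0) handled in pyBin)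
def binNat (n : Nat) : List Char :=
  if h : n = 0 then []
  else binNat (n / 2) ++ [if n % 2 = 1 then '1' else '0']
decreasing_by exact Nat.div_lt_self (Nat.pos_of_ne_zero h) (by omega)

-- bin(num) as a char list (exact: '-0b…' for negatives, '0b0' for 0)
def pyBin (n : Int) : List Char :=
  if n < 0 then '-' :: '0' :: 'b' :: binNat (-n).toNat
  else if n = 0 then ['0', 'b', '0']
  else '0' :: 'b' :: binNat n.toNat

-- s.lstrip('0b'): drop leading chars from the set {'0','b'}
def lstrip0b (s : List Char) : List Char := s.dropWhile (fun c => c == '0' || c == 'b')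

-- s.zfill(w): left-pad with '0' to width w, keeping a leading sign in place (exact)
def zfill (s : List Char) (w : Nat) : List Char :=
  match s with
  | [] => List.replicate w '0'
  | c :: rest =>
      if c == '-' || c == '+' then c :: (List.replicate (w - s.length) '0' ++ rest)
      else List.replicate (w - s.length) '0' ++ (c :: rest)

-- A's recursive check; fuel makes the Int-indexed recursion total (callers pass ample fuel:
-- the recursion depth on a padded string of length 2^k-1 is k ≤ length). none = Python's False.
def checkA (fuel : Nat) (s e : Int) (bn : List Char) : Option Char :=
  match fuel with
  | 0 => none
  | f + 1 =>
    if s = e then PySem.List.pyGet? bn s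
    else
      let mid := PySem.Int.floordiv (s + e) 2
      match checkA f s (mid - 1) bn with
      | none => none
      | some left =>
        if left = '1' ∧ PySem.List.pyGet? bn mid = some '0' then none
        else
          match checkA f (mid + 1) e bn with
          | none => none
          | some right =>
            if right = '1' ∧ PySem.List.pyGet? bn mid = some '0' then none
            else PySem.List.pyGet? bn mid

def solution (numbers : List Int) : List Int :=
  numbers.foldl (fun answer num =>
    let b0 := lstrip0b (pyBin num)
    let l2 := 2 ^ (Nat.log2 b0.length + 1) - 1   -- int(math.log2(l1)) = Nat.log2 l1 (exact on the small lengths reached)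
    let b := zfill b0 l2
    if (checkA b.length 0 ((b.length : Int) - 1) b).isSome then answer ++ [1] else answer ++ [0]) []

-- ===== PORT B =====
-- _tz(j): trailing zero bits of j (guard j ≠ 0: Python's loop is only ever called with j ≥ 1)
def tzB (j : Nat) : Nat :=
  if h : j ≠ 0 ∧ j % 2 = 0 then tzB (j / 2) + 1 else 0
decreasing_by exact Nat.div_lt_self (Nat.pos_of_ne_zero h.1) (by omega)

-- _node_ok(b, i); getD is exact here: all indices are in range whenever it is reached
def nodeOk (b : List Char) (i : Nat) : Bool :=
  let t := tzB (i + 1)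
  if t = 0 then true
  else
    (!(b.getD i ' ' == '0')) ||
      ((!(b.getD (i - 2 ^ (t - 1)) ' ' == '1')) && (!(b.getD (i + 2 ^ (t - 1)) ' ' == '1')))

def solution_alt (numbers : List Int) : List Int :=
  numbers.foldl (fun answer num =>
    let b0 := lstrip0b (pyBin num)
    let l2 := 2 ^ (Nat.log2 b0.length + 1) - 1
    let b := zfill b0 l2
    answer ++ [if (List.range b.length).all (nodeOk b) then 1 else 0]) []

-- ===== PRECONDITION & SPEC =====
-- Pre_ excludes only lists containing 0, on which A (and B) raises ValueError: math.log2(0).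
def Pre_solution (numbers : List Int) : Prop := (0 : Int) ∉ numbers
instance (numbers : List Int) : Decidable (Pre_solution numbers) := by unfold Pre_solution; infer_instance
def pvWitness_solution : List Int := [5, -3, 2, 7]

def Spec_solution (numbers : List Int) (out : List Int) : Prop := out = solution_alt numbers
instance (numbers : List Int) (out : List Int) : Decidable (Spec_solution numbers out) := by unfold Spec_solution; infer_instance

-- ===== CLAIM (what is proved, stated in full; the proofs are below) =====
def Claim_equal_solution : Prop := ∀ (numbers : List Int), Dom_solution numbers → Pre_solution numbers → Spec_solution numbers (solution numbers)

-- ===== LEMMAS AND PROOFS =====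

-- 0-based index of the root of the subtree (q, k) (occupying indices q*2^k .. (q+1)*2^k - 2)
def rootIx (q k : Nat) : Nat := (2 * q + 1) * 2 ^ (k - 1) - 1

-- validity of subtree (q, k), mirroring A's conjunction structure
def Pb (b : List Char) : Nat → Nat → Bool
  | _, 0 => true
  | _, 1 => true
  | q, (k + 2) =>
      Pb b (2 * q) (k + 1)
      && !((b.getD (rootIx (2 * q) (k + 1)) ' ' == '1') && (b.getD (rootIx q (k + 2)) ' ' == '0'))
      && Pb b (2 * q + 1) (k + 1)
      && !((b.getD (rootIx (2 * q + 1) (k + 1)) ' ' == '1') && (b.getD (rootIx q (k + 2)) ' ' == '0'))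



-- small lemmas first
lemma tzB_odd (j : Nat) (h : j % 2 = 1) : tzB j = 0 := by
  rw [tzB]; simp; omega

lemma tz_mul_pow (k m : Nat) : tzB ((2 * m + 1) * 2 ^ k) = k := by
  induction k with
  | zero => rw [tzB]; simp
  | succ k ih =>
    have hj : (2 * m + 1) * 2 ^ (k + 1) = 2 * ((2 * m + 1) * 2 ^ k) := by ring
    have hx : 0 < (2 * m + 1) * 2 ^ k := by positivity
    rw [hj, tzB]
    have hc : (2 * ((2 * m + 1) * 2 ^ k) ≠ 0 ∧ 2 * ((2 * m + 1) * 2 ^ k) % 2 = 0) := by omega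
    rw [dif_pos hc, Nat.mul_div_cancel_left _ (by norm_num), ih]

lemma binNat_head : ∀ n : Nat, n ≠ 0 → ∃ l, binNat n = '1' :: l := by
  intro n
  induction n using Nat.strong_induction_on with
  | _ n ih =>
    intro hn
    rw [binNat, dif_neg hn]
    by_cases h2 : n / 2 = 0
    · have : n = 1 := by omega
      subst this
      refine ⟨[], ?_⟩
      rw [binNat]; simp
    · obtain ⟨l, hl⟩ := ih (n / 2) (Nat.div_lt_self (by omega) (by omega)) h2
      exact ⟨l ++ [if n % 2 = 1 then '1' else '0'], by rw [hl]; simp⟩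

lemma lstrip_len_pos (num : Int) (h : num ≠ 0) : 1 ≤ (lstrip0b (pyBin num)).length := by
  unfold pyBin lstrip0b
  by_cases hneg : num < 0
  · rw [if_pos hneg, List.dropWhile_cons_of_neg (by decide)]
    simp
  · rw [if_neg hneg, if_neg h]
    obtain ⟨l, hl⟩ := binNat_head num.toNat (by omega)
    rw [hl]
    rw [List.dropWhile_cons_of_pos (by decide), List.dropWhile_cons_of_pos (by decide),
        List.dropWhile_cons_of_neg (by decide)]
    simp

lemma zfill_length (s : List Char) (w : Nat) : (zfill s w).length = max w s.length := by
  cases s with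
  | nil => simp [zfill]
  | cons c rest =>
    simp only [zfill]
    split_ifs with hc <;> simp <;> omega

lemma bool_bridge (a c x l r : Bool) :
    (a && ((!x || (!l && !r)) && c)) = (a && !(l && x) && c && !(r && x)) := by
  revert a c x l r; decide

lemma checkA_eq : ∀ (k q fuel : Nat) (b : List Char), 1 ≤ k → k ≤ fuel →
    (q + 1) * 2 ^ k - 1 ≤ b.length →
    checkA fuel ((q * 2 ^ k : Nat) : Int) ((((q + 1) * 2 ^ k : Nat) : Int) - 2) b =
      (if Pb b q k then some (b.getD (rootIx q k) ' ') else none) := by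
  intro k
  induction k using Nat.strong_induction_on with
  | _ k ih =>
  intro q fuel b h1 hf hlen
  cases k with
  | zero => omega
  | succ k0 =>
  cases k0 with
  | zero =>
    -- k = 1: a leaf interval
    cases fuel with
    | zero => omega
    | succ f =>
      simp only [Nat.zero_add, pow_one] at hlen ⊢
      have hse : ((q * 2 : Nat) : Int) = (((q + 1) * 2 : Nat) : Int) - 2 := by push_cast; ring
      have hlt : q * 2 < b.length := by omega
      simp only [checkA]
      rw [if_pos hse, PySem.List.pyGet?_natCast, List.getElem?_eq_getElem hlt]
      have hr : rootIx q 1 = q * 2 := by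
        unfold rootIx; rw [show (1:Nat) - 1 = 0 from rfl, pow_zero]; omega
      have hPb : Pb b q 1 = true := rfl
      rw [hPb, if_pos rfl, hr, List.getD_eq_getElem b ' ' hlt]
  | succ k =>
    cases fuel with
    | zero => omega
    | succ f =>
    rw [show k + 1 + 1 = k + 2 from rfl] at hlen ⊢
    obtain ⟨p, hp, hk0, hk1, hk2⟩ : ∃ p, 1 ≤ p ∧ 2 ^ k = p ∧ 2 ^ (k + 1) = 2 * p ∧ 2 ^ (k + 2) = 4 * p :=
      ⟨2 ^ k, Nat.one_le_two_pow, rfl, by ring, by ring⟩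
    obtain ⟨t, ht1, ht2, ht3, ht4, ht5⟩ :
        ∃ t, q * (4 * p) = 4 * t ∧ (q + 1) * (4 * p) = 4 * t + 4 * p ∧ 2 * q * (2 * p) = 4 * t ∧
          (2 * q + 1) * (2 * p) = 4 * t + 2 * p ∧ (2 * q + 1 + 1) * (2 * p) = 4 * t + 4 * p :=
      ⟨q * p, by ring, by ring, by ring, by ring, by ring⟩
    rw [hk2] at hlen ⊢
    rw [ht2] at hlen
    rw [ht1, ht2]
    simp only [checkA]
    rw [if_neg (by push_cast; omega)]
    rw [PySem.Int.floordiv_eq_ediv_of_pos (by norm_num)]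
    rw [show (((4 * t : Nat) : Int) + (((4 * t + 4 * p : Nat) : Int) - 2)) / 2
          = ((4 * t + 2 * p - 1 : Nat) : Int) from by omega]
    have IHL := ih (k + 1) (by omega) (2 * q) f b (by omega) (by omega)
      (by rw [hk1, ht4]; omega)
    rw [hk1, ht3, ht4] at IHL
    have IHR := ih (k + 1) (by omega) (2 * q + 1) f b (by omega) (by omega)
      (by rw [hk1, ht5]; omega)
    rw [hk1, ht4, ht5] at IHR
    rw [show ((4 * t + 2 * p - 1 : Nat) : Int) - 1 = ((4 * t + 2 * p : Nat) : Int) - 2 from by omega]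
    rw [IHL]
    rw [show ((4 * t + 2 * p - 1 : Nat) : Int) + 1 = ((4 * t + 2 * p : Nat) : Int) from by omega]
    rw [IHR]
    have hroot : rootIx q (k + 2) = 4 * t + 2 * p - 1 := by
      unfold rootIx
      rw [show k + 2 - 1 = k + 1 from rfl, hk1, ht4]
    have hlt : 4 * t + 2 * p - 1 < b.length := by omega
    rw [show PySem.List.pyGet? b ((4 * t + 2 * p - 1 : Nat) : Int) = some (b.getD (4 * t + 2 * p - 1) ' ') from by
      rw [PySem.List.pyGet?_natCast, List.getElem?_eq_getElem hlt, List.getD_eq_getElem b ' ' hlt]]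
    simp only [Pb, hroot]
    clear ih IHL IHR hf h1 hk0 hk1 hk2 ht1 ht2 ht3 ht4 ht5 hlen hp hroot hlt
    cases hL : Pb b (2 * q) (k + 1) with
    | false => simp [hL]
    | true =>
      by_cases hc1 : (b.getD (rootIx (2 * q) (k + 1)) ' ' = '1' ∧ b.getD (4 * t + 2 * p - 1) ' ' = '0')
      · simp_all
      · cases hR : Pb b (2 * q + 1) (k + 1) with
        | false => simp [hL, hR, hc1]
        | true =>
          by_cases hc2 : (b.getD (rootIx (2 * q + 1) (k + 1)) ' ' = '1' ∧ b.getD (4 * t + 2 * p - 1) ' ' = '0')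
          · simp_all
          · simp only [not_and] at hc1 hc2
            simp [hL, hR]
            simp only [List.getD_eq_getElem?_getD] at hc1 hc2
            split_ifs <;> first | rfl | tauto

lemma all_eq_Pb : ∀ (k q : Nat) (b : List Char), 1 ≤ k →
    ((List.range' (q * 2 ^ k) (2 ^ k - 1)).all (nodeOk b)) = Pb b q k := by
  intro k
  induction k using Nat.strong_induction_on with
  | _ k ih =>
  intro q b h1
  cases k with
  | zero => omega
  | succ k0 =>
  cases k0 with
  | zero =>
    simp only [Nat.zero_add, pow_one]
    rw [show (2 : Nat) - 1 = 1 from rfl, List.range'_one]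
    have ht : tzB (q * 2 + 1) = 0 := tzB_odd _ (by omega)
    simp [nodeOk, ht, Pb]
  | succ k =>
    rw [show k + 1 + 1 = k + 2 from rfl]
    obtain ⟨p, hp, hk0, hk1, hk2⟩ : ∃ p, 1 ≤ p ∧ 2 ^ k = p ∧ 2 ^ (k + 1) = 2 * p ∧ 2 ^ (k + 2) = 4 * p :=
      ⟨2 ^ k, Nat.one_le_two_pow, rfl, by ring, by ring⟩
    obtain ⟨t, ht1, ht3, ht4, ht6, ht7⟩ :
        ∃ t, q * (4 * p) = 4 * t ∧ 2 * q * (2 * p) = 4 * t ∧ (2 * q + 1) * (2 * p) = 4 * t + 2 * p ∧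
          (2 * (2 * q) + 1) * p = 4 * t + p ∧ (2 * (2 * q + 1) + 1) * p = 4 * t + 3 * p :=
      ⟨q * p, by ring, by ring, by ring, by ring, by ring⟩
    rw [hk2, ht1]
    have e1 : List.range' (4 * t) (4 * p - 1) =
        List.range' (4 * t) (2 * p - 1) ++ List.range' (4 * t + (2 * p - 1)) (1 + (2 * p - 1)) := by
      rw [List.range'_append_1]; congr 1; omega
    have e2 : List.range' (4 * t + (2 * p - 1)) (1 + (2 * p - 1)) =
        List.range' (4 * t + (2 * p - 1)) 1 ++ List.range' (4 * t + (2 * p - 1) + 1) (2 * p - 1) := by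
      rw [List.range'_append_1]
    rw [e1, e2, List.all_append, List.all_append, List.range'_one]
    simp only [List.all_cons, List.all_nil, Bool.and_true]
    have IHL := ih (k + 1) (by omega) (2 * q) b (by omega)
    rw [hk1, ht3] at IHL
    have IHR := ih (k + 1) (by omega) (2 * q + 1) b (by omega)
    rw [hk1, ht4] at IHR
    rw [show 4 * t + (2 * p - 1) + 1 = 4 * t + 2 * p from by omega]
    rw [IHL, IHR]
    simp only [nodeOk]
    rw [show 4 * t + (2 * p - 1) + 1 = (2 * q + 1) * 2 ^ (k + 1) from by rw [hk1, ht4]; omega]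
    rw [tz_mul_pow]
    rw [if_neg (by omega)]
    rw [show k + 1 - 1 = k from rfl, hk0]
    rw [show 4 * t + (2 * p - 1) - p = rootIx (2 * q) (k + 1) from by
      unfold rootIx; rw [show k + 1 - 1 = k from rfl, hk0, ht6]; omega]
    rw [show 4 * t + (2 * p - 1) + p = rootIx (2 * q + 1) (k + 1) from by
      unfold rootIx; rw [show k + 1 - 1 = k from rfl, hk0, ht7]; omega]
    rw [show 4 * t + (2 * p - 1) = rootIx q (k + 2) from by
      unfold rootIx; rw [show k + 2 - 1 = k + 1 from rfl, hk1, ht4]; omega]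
    simp only [Pb]
    exact bool_bridge _ _ _ _ _

lemma cond_eq (b0 : List Char) (h : 1 ≤ b0.length) :
    (checkA (zfill b0 (2 ^ (Nat.log2 b0.length + 1) - 1)).length 0
       (((zfill b0 (2 ^ (Nat.log2 b0.length + 1) - 1)).length : Int) - 1)
       (zfill b0 (2 ^ (Nat.log2 b0.length + 1) - 1))).isSome
    = (List.range (zfill b0 (2 ^ (Nat.log2 b0.length + 1) - 1)).length).all
        (nodeOk (zfill b0 (2 ^ (Nat.log2 b0.length + 1) - 1))) := by
  have hlen : (zfill b0 (2 ^ (Nat.log2 b0.length + 1) - 1)).length = 2 ^ (Nat.log2 b0.length + 1) - 1 := by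
    rw [zfill_length]
    have h2 : b0.length < 2 ^ (Nat.log2 b0.length + 1) := Nat.lt_log2_self
    omega
  set K := Nat.log2 b0.length + 1 with hKdef
  set b := zfill b0 (2 ^ K - 1) with hbdef
  have h2K : 1 ≤ 2 ^ K := Nat.one_le_two_pow
  have hKK : K < 2 ^ K := Nat.lt_two_pow_self
  have hA := checkA_eq K 0 b.length b (by omega) (by rw [hlen]; omega) (by rw [hlen]; omega)
  rw [show (0 * 2 ^ K : Nat) = 0 from by simp, show ((0 + 1) * 2 ^ K : Nat) = 2 ^ K from by simp] at hA
  simp only [Nat.cast_zero] at hA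
  rw [show ((2 ^ K : Nat) : Int) - 2 = (b.length : Int) - 1 from by rw [hlen]; omega] at hA
  rw [hA]
  have hB := all_eq_Pb K 0 b (by omega)
  norm_num at hB
  rw [List.range_eq_range', hlen, hB]
  cases hPb : Pb b 0 K <;> simp [hPb]

lemma fold_eq : ∀ (nums : List Int) (acc : List Int), (∀ x ∈ nums, x ≠ 0) →
    nums.foldl (fun answer num =>
      if (checkA (zfill (lstrip0b (pyBin num)) (2 ^ (Nat.log2 (lstrip0b (pyBin num)).length + 1) - 1)).length 0
            (((zfill (lstrip0b (pyBin num)) (2 ^ (Nat.log2 (lstrip0b (pyBin num)).length + 1) - 1)).length : Int) - 1)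
            (zfill (lstrip0b (pyBin num)) (2 ^ (Nat.log2 (lstrip0b (pyBin num)).length + 1) - 1))).isSome
      then answer ++ [1] else answer ++ [0]) acc
    = nums.foldl (fun answer num =>
      answer ++ [if (List.range (zfill (lstrip0b (pyBin num)) (2 ^ (Nat.log2 (lstrip0b (pyBin num)).length + 1) - 1)).length).all
            (nodeOk (zfill (lstrip0b (pyBin num)) (2 ^ (Nat.log2 (lstrip0b (pyBin num)).length + 1) - 1)))
        then 1 else 0]) acc := by
  intro nums
  induction nums with
  | nil => intro acc _; rfl
  | cons x xs ih =>
    intro acc h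
    have hx : x ≠ 0 := h x List.mem_cons_self
    simp only [List.foldl_cons]
    rw [ih _ (fun y hy => h y (List.mem_cons_of_mem _ hy))]
    congr 1
    rw [cond_eq (lstrip0b (pyBin x)) (lstrip_len_pos x hx)]
    cases hall : (List.range (zfill (lstrip0b (pyBin x)) (2 ^ (Nat.log2 (lstrip0b (pyBin x)).length + 1) - 1)).length).all
        (nodeOk (zfill (lstrip0b (pyBin x)) (2 ^ (Nat.log2 (lstrip0b (pyBin x)).length + 1) - 1))) <;>
      simp [hall]

-- ===== VERDICT (by name: the statement is the Claim_ definition above) =====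
theorem solution_spec : Claim_equal_solution := by
  intro numbers _ hpre
  unfold Spec_solution solution solution_alt
  exact fold_eq numbers [] (fun x hx hx0 => hpre (hx0 ▸ hx))
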